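-- pv_equiv track=rewrite | github.com/AhhhHmmm/Advent-of-Code | AoC 2015/Day 5/check_nice.py | checkBadPairs
-- ===== SOURCE A (Python) =====
-- def checkBadPairs(message):
-- 	num = 0
-- 	bad_pairs = ['ab','cd','pq','xy']
-- 	check_bad_pairs = True
-- 	while (num < len(message)-1 and check_bad_pairs):
-- 		if (message[num] + message[num+1]) in bad_pairs:
-- 			check_bad_pairs = False
-- 			num += 1
-- 			break
-- 		else:
-- 			num += 1
-- 	return(check_bad_pairs)
-- ===== SOURCE B (Python) =====
-- def checkBadPairs(message):
--     return not any(p in message for p in ['ab', 'cd', 'pq', 'xy'])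
-- ===== Notes on version B (the rewrite author's own statement) =====
-- stated objective: idiomatic
-- what changed: B loops over the four fixed bad pairs and uses substring search on the whole message, instead of A's index-by-index scan over positions with a manual flag and break.
import Mathlib
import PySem

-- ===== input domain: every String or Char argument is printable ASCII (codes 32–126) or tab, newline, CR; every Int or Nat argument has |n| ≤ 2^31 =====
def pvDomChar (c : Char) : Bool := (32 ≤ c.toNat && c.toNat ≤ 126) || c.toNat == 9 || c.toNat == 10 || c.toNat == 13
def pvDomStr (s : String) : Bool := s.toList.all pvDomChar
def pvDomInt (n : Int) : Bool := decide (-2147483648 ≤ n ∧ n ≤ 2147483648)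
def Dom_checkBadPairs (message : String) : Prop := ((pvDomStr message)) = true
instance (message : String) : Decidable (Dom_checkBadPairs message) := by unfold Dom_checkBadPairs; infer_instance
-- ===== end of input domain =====

-- B replaces A's position-by-position scan (with flag/break) by a loop over the four
-- bad pairs, each checked with a whole-string substring search (more idiomatic).

-- ===== PORT A =====
-- A's while loop advances `num`; examining message[num], message[num+1] at successive
-- indices is transcribed as structural recursion over the successive suffixes of the
-- char list; the two-char string message[num]+message[num+1] is its char list [c1, c2].
def checkBadPairsGo : List Char → Bool
  | c1 :: c2 :: rest =>
      if [c1, c2] ∈ [['a','b'], ['c','d'], ['p','q'], ['x','y']] then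
        false                                    -- check_bad_pairs = False; break
      else
        checkBadPairsGo (c2 :: rest)             -- num += 1
  | _ => true                                    -- loop never entered / ran off the end

def checkBadPairs (message : String) : Bool := checkBadPairsGo message.toList

-- ===== PORT B =====
-- return not any(p in message for p in ['ab','cd','pq','xy'])
def checkBadPairs_alt (message : String) : Bool :=
  !(["ab", "cd", "pq", "xy"].any (fun p => PySem.Str.isIn p message))

-- ===== PRECONDITION & SPEC =====
def Spec_checkBadPairs (message : String) (out : Bool) : Prop := out = checkBadPairs_alt message
instance (message : String) (out : Bool) : Decidable (Spec_checkBadPairs message out) := by unfold Spec_checkBadPairs; infer_instance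

-- ===== CLAIM (what is proved, stated in full; the proofs are below) =====
def Claim_equal_checkBadPairs : Prop := ∀ (message : String), Dom_checkBadPairs message → Spec_checkBadPairs message (checkBadPairs message)

-- ===== LEMMAS AND PROOFS =====

-- a two-element list is an infix of a cons iff it starts there or is an infix of the tail
theorem pair_infix_cons (a b c : Char) (t : List Char) :
    [a, b] <:+: c :: t ↔ (a = c ∧ ([b] <+: t)) ∨ [a, b] <:+: t := by
  rw [List.infix_cons_iff, List.cons_prefix_cons]

theorem pair_prefix_cons (b c : Char) (t : List Char) :
    ([b] <+: c :: t) ↔ b = c := by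
  rw [List.cons_prefix_cons]
  simp

-- A's scan returns false exactly when some bad pair occurs as an infix
theorem checkBadPairsGo_eq (cs : List Char) :
    checkBadPairsGo cs =
      !([['a','b'], ['c','d'], ['p','q'], ['x','y']].any
          (fun p => decide (p <:+: cs))) := by
  match cs with
  | [] =>
      simp [checkBadPairsGo]
  | [c] =>
      have h : ∀ a b : Char, ¬ ([a, b] <:+: [c]) := by
        intro a b h
        have := h.length_le
        simp at this
      simp [checkBadPairsGo, h]
  | c1 :: c2 :: rest =>
      have ih := checkBadPairsGo_eq (c2 :: rest)
      by_cases hmem : [c1, c2] ∈ [['a','b'], ['c','d'], ['p','q'], ['x','y']]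
      · -- the pair at the current position matches: both sides are false
        have hany : ([['a','b'], ['c','d'], ['p','q'], ['x','y']].any
            (fun p => decide (p <:+: c1 :: c2 :: rest))) = true := by
          simp only [List.any_eq_true, decide_eq_true_eq]
          exact ⟨[c1, c2], hmem, ⟨[], rest, rfl⟩⟩
        simp only [checkBadPairsGo, if_pos hmem, hany, Bool.not_true]
      · -- no match here: a pair is an infix iff it is an infix of the tail
        have hiff : ∀ p ∈ [['a','b'], ['c','d'], ['p','q'], ['x','y']],
            (p <:+: c1 :: c2 :: rest ↔ p <:+: c2 :: rest) := by
          intro p hp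
          fin_cases hp <;>
          · constructor
            · intro h
              rcases (pair_infix_cons _ _ _ _).mp h with ⟨h1, h2⟩ | h
              · exfalso
                rw [pair_prefix_cons] at h2
                subst h1; subst h2
                simp at hmem
              · exact h
            · intro h
              exact h.trans (List.suffix_cons c1 (c2 :: rest)).isInfix
        simp only [checkBadPairsGo, if_neg hmem, ih,
          List.any_cons, List.any_nil, Bool.or_false,
          decide_eq_decide.mpr (hiff ['a','b'] (by simp)),
          decide_eq_decide.mpr (hiff ['c','d'] (by simp)),
          decide_eq_decide.mpr (hiff ['p','q'] (by simp)),
          decide_eq_decide.mpr (hiff ['x','y'] (by simp))]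

theorem isIn_eq_decide (p s : String) :
    PySem.Str.isIn p s = decide (p.toList <:+: s.toList) := by
  by_cases hi : p.toList <:+: s.toList
  · simp only [hi, decide_true]
    exact (PySem.Str.isIn_iff_infix p s).mpr hi
  · simp only [hi, decide_false]
    rw [← Bool.not_eq_true, PySem.Str.isIn_iff_infix p s]
    exact hi

-- ===== VERDICT (by name: the statement is the Claim_ definition above) =====
theorem checkBadPairs_spec : Claim_equal_checkBadPairs := by
  intro message _
  unfold Spec_checkBadPairs checkBadPairs checkBadPairs_alt
  rw [checkBadPairsGo_eq]
  simp only [isIn_eq_decide]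
  rfl
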